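-- pv_equiv track=rewrite | github.com/silvercloud1442/bimbimbambam | finder.py | count_empty_cells
-- ===== SOURCE A (Python) =====
-- def count_empty_cells(glass):
--     empty_count = 0
--     count = False
--     for row in glass:
--         if (1 in row or 2 in row) and not count:
--             count = True
--             continue
--         if count:
--             empty_count += row.count(0)
--     return empty_count
-- ===== SOURCE B (Python) =====
-- def count_empty_cells(glass):
--     zeros_after = 0
--     result = 0
--     for row in reversed(glass):
--         if 1 in row or 2 in row:
--             result = zeros_after
--         zeros_after += row.count(0)
--     return result
-- ===== Notes on version B (the rewrite author's own statement) =====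
-- stated objective: alternative
-- what changed: Replaces A's forward flag-driven scan by a single backward pass that maintains a running suffix zero-sum and overwrites the result at every active row, so the earliest active row's suffix sum survives; no boolean state, no early return, no slicing.
import Mathlib
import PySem

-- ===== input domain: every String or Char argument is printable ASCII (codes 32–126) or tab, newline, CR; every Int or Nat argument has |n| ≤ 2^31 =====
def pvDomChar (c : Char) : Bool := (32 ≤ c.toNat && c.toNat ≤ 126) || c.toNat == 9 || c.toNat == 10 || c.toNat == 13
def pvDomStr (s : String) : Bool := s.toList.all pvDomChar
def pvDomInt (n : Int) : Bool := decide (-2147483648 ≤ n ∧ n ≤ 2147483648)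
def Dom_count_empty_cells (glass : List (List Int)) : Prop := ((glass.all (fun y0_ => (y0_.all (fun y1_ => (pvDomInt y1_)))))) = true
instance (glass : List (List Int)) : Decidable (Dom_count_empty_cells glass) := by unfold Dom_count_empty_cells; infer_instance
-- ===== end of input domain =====

-- B replaces A's forward flag-driven scan by a single backward pass carrying a suffix
-- zero-sum, overwriting the result at each active row (earliest wins); alternative, same cost.

-- ===== PORT A =====
-- A: single forward fold carrying (empty_count, count-flag); pvStepA is the loop body, branches in source order.
def pvStepA (st : Int × Bool) (row : List Int) : Int × Bool :=
  if (row.contains 1 || row.contains 2) && !st.2 then (st.1, true)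
  else if st.2 then (st.1 + (PySem.List.count row 0 : Int), st.2)
  else st

def count_empty_cells (glass : List (List Int)) : Int :=
  (glass.foldl pvStepA (0, false)).1

-- ===== PORT B =====
-- B: backward pass over the list (Python's `for row in reversed(glass)`), carrying
-- (zeros_after, result); structural recursion on the list IS that backward traversal.
def pvGoB : List (List Int) → Int × Int
  | [] => (0, 0)
  | row :: rest =>
    let za := pvGoB rest
    ((PySem.List.count row 0 : Int) + za.1,
     if row.contains 1 || row.contains 2 then za.1 else za.2)

def count_empty_cells_alt (glass : List (List Int)) : Int := (pvGoB glass).2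

-- ===== PRECONDITION & SPEC =====
def Spec_count_empty_cells (glass : List (List Int)) (out : Int) : Prop := out = count_empty_cells_alt glass
instance (glass : List (List Int)) (out : Int) : Decidable (Spec_count_empty_cells glass out) := by unfold Spec_count_empty_cells; infer_instance

-- ===== CLAIM =====
def Claim_equal_count_empty_cells : Prop := ∀ (glass : List (List Int)), Dom_count_empty_cells glass → Spec_count_empty_cells glass (count_empty_cells glass)

-- ===== LEMMAS AND PROOFS =====
theorem pvGoB_fst (glass : List (List Int)) :
    (pvGoB glass).1 = (glass.map (fun r => (PySem.List.count r 0 : Int))).sum := by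
  induction glass with
  | nil => simp [pvGoB]
  | cons row rest ih => simp [pvGoB, ih]

theorem pv_foldl_true (glass : List (List Int)) (acc : Int) :
    (glass.foldl pvStepA (acc, true)).1
    = acc + (glass.map (fun r => (PySem.List.count r 0 : Int))).sum := by
  induction glass generalizing acc with
  | nil => simp
  | cons row rest ih =>
    have hstep : pvStepA (acc, true) row = (acc + (PySem.List.count row 0 : Int), true) := by
      simp [pvStepA]
    rw [List.foldl_cons, hstep, ih]
    simp; ring

theorem pv_foldl_false (glass : List (List Int)) :
    (glass.foldl pvStepA (0, false)).1 = (pvGoB glass).2 := by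
  induction glass with
  | nil => simp [pvGoB]
  | cons row rest ih =>
    by_cases h : (row.contains 1 || row.contains 2) = true
    · have hstep : pvStepA (0, false) row = (0, true) := by simp only [pvStepA, h]; rfl
      rw [List.foldl_cons, hstep, pv_foldl_true, ← pvGoB_fst]
      simp only [pvGoB, h, if_true, zero_add]
    · have hstep : pvStepA (0, false) row = (0, false) := by
        simp only [pvStepA, eq_false_of_ne_true h]; rfl
      rw [List.foldl_cons, hstep]
      simp only [pvGoB, eq_false_of_ne_true h]
      exact ih

-- ===== VERDICT =====
theorem count_empty_cells_spec : Claim_equal_count_empty_cells := by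
  intro glass _
  unfold Spec_count_empty_cells count_empty_cells count_empty_cells_alt
  exact pv_foldl_false glass
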